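-- pv_equiv track=rewrite | github.com/Gustavo-F-E/fast-api-filpath | uso_en_local/test_patrones.py | generar_serie
-- ===== SOURCE A (Python) =====
-- def generar_serie(primer_valor, valor_maximo):
--     # Inicializar la serie
--     serie = []
--     serie.append(primer_valor)  # Comenzar con el primer valor
--     contador = 1
--
--     while True:
--         # Calcular el siguiente incremento basado en la posición
--         if contador % 4 == 0:
--             incremento = 3  # Aumento de 3 cada 4 términos
--         else:
--             incremento = 2  # Aumento de 2 en los demás casos
--
--         # Calcular el siguiente valor
--         siguiente_valor = serie[contador - 1] + incremento
--
--         # Salir del bucle si el siguiente valor excede el valor máximo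
--         if siguiente_valor > valor_maximo:
--             break
--
--         # Agregar el siguiente valor a la serie
--         serie.append(siguiente_valor)
--         contador += 1
--
--     return serie
-- ===== SOURCE B (Python) =====
-- def generar_serie(primer_valor, valor_maximo):
--     # index-driven: the i-th term (i >= 1) is given by the closed form
--     # primer_valor + 9*(i//4) + 2*(i%4); primer_valor itself is always emitted.
--     serie = [primer_valor]
--     i = 1
--     while True:
--         valor = primer_valor + 9 * (i // 4) + 2 * (i % 4)
--         if valor > valor_maximo:
--             return serie
--         serie.append(valor)
--         i += 1
-- ===== Notes on version B (the rewrite author's own statement) =====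
-- stated objective: alternative
-- what changed: Each term is computed directly from its index by the closed form primer_valor + 9*(i//4) + 2*(i%4) instead of accumulating cyclic increments from the previous element.
import Mathlib
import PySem

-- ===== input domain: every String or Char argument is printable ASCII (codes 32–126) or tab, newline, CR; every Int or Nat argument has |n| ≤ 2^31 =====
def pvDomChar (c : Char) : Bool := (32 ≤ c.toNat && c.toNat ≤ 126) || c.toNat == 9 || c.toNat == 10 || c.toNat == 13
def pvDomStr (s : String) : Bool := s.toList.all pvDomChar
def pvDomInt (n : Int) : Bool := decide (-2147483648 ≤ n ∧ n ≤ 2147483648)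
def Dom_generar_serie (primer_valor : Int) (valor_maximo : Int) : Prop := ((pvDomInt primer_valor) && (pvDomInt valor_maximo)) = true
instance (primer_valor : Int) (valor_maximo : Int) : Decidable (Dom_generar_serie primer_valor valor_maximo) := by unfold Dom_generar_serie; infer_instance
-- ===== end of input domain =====

-- B computes each term directly from its index by a closed form instead of
-- accumulating cyclic increments from the previous element (alternative, same cost).

-- ===== PORT A =====
-- A's while-loop: state is the series (kept reversed so that serie[contador-1],
-- always the last appended element, is the head) and the counter; 'append' is
-- cons on the reversed list, undone by .reverse at the break.
def generar_serie_loopA (valor_maximo : Int) (contador : Nat) (serie_rev : List Int) : List Int :=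
  -- incremento = if contador % 4 = 0 then 3 else 2; siguiente_valor = serie[contador-1] + incremento
  if valor_maximo < serie_rev.headI + (if contador % 4 = 0 then (3 : Int) else 2) then serie_rev.reverse
  else generar_serie_loopA valor_maximo (contador + 1)
    ((serie_rev.headI + (if contador % 4 = 0 then (3 : Int) else 2)) :: serie_rev)
termination_by (valor_maximo + 1 - serie_rev.headI).toNat
decreasing_by
  rename_i h
  cases serie_rev <;> simp_all <;> split_ifs at * <;> omega

def generar_serie (primer_valor : Int) (valor_maximo : Int) : List Int :=
  generar_serie_loopA valor_maximo 1 [primer_valor]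

-- ===== PORT B =====
-- B's while-loop: the i-th term is primer_valor + 9*(i/4) + 2*(i%4); the series
-- accumulator is likewise kept reversed.
def generar_serie_loopB (primer_valor valor_maximo : Int) (i : Nat) (serie_rev : List Int) : List Int :=
  -- valor = primer_valor + 9*(i//4) + 2*(i%4)
  if primer_valor + 9 * ((i / 4 : Nat) : Int) + 2 * ((i % 4 : Nat) : Int) > valor_maximo then serie_rev.reverse
  else generar_serie_loopB primer_valor valor_maximo (i + 1)
    ((primer_valor + 9 * ((i / 4 : Nat) : Int) + 2 * ((i % 4 : Nat) : Int)) :: serie_rev)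
termination_by (valor_maximo + 2 - (primer_valor + 2 * i)).toNat
decreasing_by
  rename_i h
  omega

def generar_serie_alt (primer_valor : Int) (valor_maximo : Int) : List Int :=
  generar_serie_loopB primer_valor valor_maximo 1 [primer_valor]

-- ===== PRECONDITION & SPEC =====
def Spec_generar_serie (primer_valor : Int) (valor_maximo : Int) (out : List Int) : Prop := out = generar_serie_alt primer_valor valor_maximo
instance (primer_valor : Int) (valor_maximo : Int) (out : List Int) : Decidable (Spec_generar_serie primer_valor valor_maximo out) := by unfold Spec_generar_serie; infer_instance

-- ===== CLAIM =====
def Claim_equal_generar_serie : Prop := ∀ (primer_valor : Int) (valor_maximo : Int), Dom_generar_serie primer_valor valor_maximo → Spec_generar_serie primer_valor valor_maximo (generar_serie primer_valor valor_maximo)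

-- ===== LEMMAS AND PROOFS =====
-- Invariant: entering A's loop at counter c ≥ 1, the last appended element (the
-- head of the reversed series) equals B's closed form at index c-1; then both
-- loops compute the same next value and agree step by step.
theorem loopA_eq_loopB (p m : Int) : ∀ (c : Nat) (acc : List Int), 1 ≤ c →
    acc.headI = p + 9 * (((c - 1) / 4 : Nat) : Int) + 2 * (((c - 1) % 4 : Nat) : Int) →
    generar_serie_loopA m c acc = generar_serie_loopB p m c acc := by
  intro c acc
  induction c, acc using generar_serie_loopA.induct m with
  | case1 c acc hstop =>
    intro hc hhead
    rw [generar_serie_loopA, generar_serie_loopB]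
    simp only [dite_eq_ite] at hstop
    have hv : acc.headI + (if c % 4 = 0 then (3:Int) else 2)
        = p + 9 * ((c / 4 : Nat) : Int) + 2 * ((c % 4 : Nat) : Int) := by
      rw [hhead]; split <;> rename_i h4 <;> push_cast <;> omega
    rw [hv] at hstop
    rw [hv, if_pos hstop, if_pos hstop]
  | case2 c acc hstop ih =>
    intro hc hhead
    rw [generar_serie_loopA, generar_serie_loopB]
    simp only [dite_eq_ite] at hstop ih
    have hv : acc.headI + (if c % 4 = 0 then (3:Int) else 2)
        = p + 9 * ((c / 4 : Nat) : Int) + 2 * ((c % 4 : Nat) : Int) := by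
      rw [hhead]; split <;> rename_i h4 <;> push_cast <;> omega
    rw [hv] at hstop ih
    rw [hv, if_neg hstop, if_neg hstop]
    exact ih (by omega) (by simp only [List.headI_cons, Nat.add_sub_cancel])

-- ===== VERDICT =====
theorem generar_serie_spec : Claim_equal_generar_serie := by
  intro p m _
  unfold Spec_generar_serie generar_serie generar_serie_alt
  exact loopA_eq_loopB p m 1 [p] (by omega) (by simp)
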